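-- pv_equiv track=rewrite | github.com/monofy-org/monofy-ai | plugins/extras/iptv.py | parse_m3u_to_json
-- ===== SOURCE A (Python) =====
-- def parse_m3u_to_json(m3u_content):
--     lines = m3u_content.splitlines()
--     results = []
--     i = 0
--     while i < len(lines):
--         line = lines[i].strip()
--         if line.startswith("#EXTINF:"):
--             # Find the next non-empty line (should be the stream URL)
--             j = i + 1
--             while j < len(lines) and not lines[j].strip():
--                 j += 1
--             if j < len(lines):
--                 url = lines[j].strip()
--                 name = line.split(",")[-1]
--                 logo = ""
--                 group = ""
--                 if 'tvg-logo="' in line: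
--                     logo = line.split('tvg-logo="')[1].split('"')[0]
--                 if 'group-title="' in line:
--                     group = line.split('group-title="')[1].split('"')[0]
--                 results.append({"name": name, "url": url, "logo": logo, "group": group})
--             i = j
--         else:
--             i += 1
--     return results
-- ===== SOURCE B (Python) =====
-- def _extinf_fields(line):
--     name = line.split(",")[-1]
--     logo = line.split('tvg-logo="')[1].split('"')[0] if 'tvg-logo="' in line else ""
--     group = line.split('group-title="')[1].split('"')[0] if 'group-title="' in line else ""
--     return name, logo, group
--
--
-- def parse_m3u_to_json(m3u_content):
--     results = []
--     pending = None  # parsed fields of the EXTINF line waiting for its URL line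
--     for raw in m3u_content.splitlines():
--         line = raw.strip()
--         if not line:
--             continue
--         if pending is not None:
--             name, logo, group = pending
--             results.append({"name": name, "url": line, "logo": logo, "group": group})
--             pending = None
--         if line.startswith("#EXTINF:"):
--             pending = _extinf_fields(line)
--     return results
-- ===== Notes on version B (the rewrite author's own statement) =====
-- stated objective: simpler
-- what changed: Replaced A's index-based while loop, which scans ahead with an inner while to find each EXTINF entry's URL line, by a single for-loop over the stripped lines that carries the most recent EXTINF line's parsed fields and flushes them at the next non-empty line.
import Mathlib
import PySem

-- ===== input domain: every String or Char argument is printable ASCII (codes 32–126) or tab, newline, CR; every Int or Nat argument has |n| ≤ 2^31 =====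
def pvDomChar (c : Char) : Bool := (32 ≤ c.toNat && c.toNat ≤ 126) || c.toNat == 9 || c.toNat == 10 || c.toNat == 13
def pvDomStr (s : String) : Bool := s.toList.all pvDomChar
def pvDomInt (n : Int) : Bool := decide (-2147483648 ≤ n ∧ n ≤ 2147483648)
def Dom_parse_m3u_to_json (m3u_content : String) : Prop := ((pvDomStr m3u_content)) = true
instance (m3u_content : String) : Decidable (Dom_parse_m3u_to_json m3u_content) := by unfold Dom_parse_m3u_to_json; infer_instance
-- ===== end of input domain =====

-- B replaces A's index/while loop (with an inner skip-ahead scan for the URL line) by a single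
-- fold over the stripped lines carrying the last EXTINF line's parsed fields; objective: simpler.


-- ===== PORT A =====
-- inner while: advance j past lines whose strip is empty
def pvFindJ (lines : List String) (j : Nat) : Nat :=
  if h : j < lines.length then
    if PySem.Str.strip lines[j] = "" then pvFindJ lines (j + 1) else j
  else j
termination_by lines.length - j
decreasing_by omega

theorem pvFindJ_ge (lines : List String) (j : Nat) : j ≤ pvFindJ lines j := by
  unfold pvFindJ
  split
  · split
    · exact Nat.le_trans (Nat.le_succ j) (pvFindJ_ge lines (j + 1))
    · exact Nat.le_refl j
  · exact Nat.le_refl j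
termination_by lines.length - j
decreasing_by omega

-- outer while over the index i
def pvALoop (lines : List String) (i : Nat)
    (results : List (List (String × String))) : List (List (String × String)) :=
  if hi : i < lines.length then
    let line := PySem.Str.strip lines[i]
    if PySem.Str.startswith line "#EXTINF:" then
      let j := pvFindJ lines (i + 1)
      if hj : j < lines.length then
        let url := PySem.Str.strip lines[j]
        let name := (PySem.List.pyGet? ((PySem.Str.split? line ",").getD []) (-1)).getD ""
        let logo := if PySem.Str.isIn "tvg-logo=\"" line then
            (PySem.List.pyGet? ((PySem.Str.split?
              ((PySem.List.pyGet? ((PySem.Str.split? line "tvg-logo=\"").getD []) 1).getD "")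
              "\"").getD []) 0).getD ""
          else ""
        let group := if PySem.Str.isIn "group-title=\"" line then
            (PySem.List.pyGet? ((PySem.Str.split?
              ((PySem.List.pyGet? ((PySem.Str.split? line "group-title=\"").getD []) 1).getD "")
              "\"").getD []) 0).getD ""
          else ""
        pvALoop lines j
          (results ++ [[("name", name), ("url", url), ("logo", logo), ("group", group)]])
      else results
    else pvALoop lines (i + 1) results
  else results
termination_by lines.length - i
decreasing_by
  · have := pvFindJ_ge lines (i + 1); omega
  · omega

def parse_m3u_to_json (m3u_content : String) : List (List (String × String)) :=
  pvALoop (PySem.Str.splitlines m3u_content) 0 []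

-- ===== PORT B =====
-- parse the three EXTINF attributes of a stripped #EXTINF line
def pvExtinfFields (line : String) : String × String × String :=
  let name := (PySem.List.pyGet? ((PySem.Str.split? line ",").getD []) (-1)).getD ""
  let logo := if PySem.Str.isIn "tvg-logo=\"" line then
      (PySem.List.pyGet? ((PySem.Str.split?
        ((PySem.List.pyGet? ((PySem.Str.split? line "tvg-logo=\"").getD []) 1).getD "")
        "\"").getD []) 0).getD ""
    else ""
  let group := if PySem.Str.isIn "group-title=\"" line then
      (PySem.List.pyGet? ((PySem.Str.split?
        ((PySem.List.pyGet? ((PySem.Str.split? line "group-title=\"").getD []) 1).getD "")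
        "\"").getD []) 0).getD ""
    else ""
  (name, logo, group)

-- one iteration of B's for-loop: state = (results, pending EXTINF fields)
def pvBStep (st : List (List (String × String)) × Option (String × String × String))
    (raw : String) : List (List (String × String)) × Option (String × String × String) :=
  let line := PySem.Str.strip raw
  if line = "" then st
  else
    let results := match st.2 with
      | some (name, logo, group) =>
          st.1 ++ [[("name", name), ("url", line), ("logo", logo), ("group", group)]]
      | none => st.1
    let pending := if PySem.Str.startswith line "#EXTINF:" then some (pvExtinfFields line)
      else none
    (results, pending)

def parse_m3u_to_json_alt (m3u_content : String) : List (List (String × String)) :=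
  ((PySem.Str.splitlines m3u_content).foldl pvBStep ([], none)).1

-- ===== PRECONDITION & SPEC =====
def Spec_parse_m3u_to_json (m3u_content : String) (out : List (List (String × String))) : Prop := out = parse_m3u_to_json_alt m3u_content
instance (m3u_content : String) (out : List (List (String × String))) : Decidable (Spec_parse_m3u_to_json m3u_content out) := by unfold Spec_parse_m3u_to_json; infer_instance

-- ===== CLAIM (what is proved, stated in full; the proofs are below) =====
def Claim_equal_parse_m3u_to_json : Prop := ∀ (m3u_content : String), Dom_parse_m3u_to_json m3u_content → Spec_parse_m3u_to_json m3u_content (parse_m3u_to_json m3u_content)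

-- ===== LEMMAS AND PROOFS =====

theorem pvFindJ_le (lines : List String) (j : Nat) (h : j ≤ lines.length) :
    pvFindJ lines j ≤ lines.length := by
  unfold pvFindJ
  split
  · split
    · exact pvFindJ_le lines (j + 1) (by omega)
    · exact h
  · exact h
termination_by lines.length - j
decreasing_by omega

theorem pvFindJ_empty (lines : List String) (j k : Nat) (h1 : j ≤ k)
    (h2 : k < pvFindJ lines j) : ∃ h : k < lines.length, PySem.Str.strip lines[k] = "" := by
  rw [pvFindJ.eq_def] at h2
  by_cases hl : j < lines.length
  · simp only [hl, dite_true] at h2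
    by_cases he : PySem.Str.strip lines[j] = ""
    · simp only [he, if_true] at h2
      rcases Nat.eq_or_lt_of_le h1 with rfl | hlt
      · exact ⟨hl, he⟩
      · exact pvFindJ_empty lines (j + 1) k hlt h2
    · simp only [he, if_false] at h2; omega
  · simp only [hl, dite_false] at h2; omega
termination_by lines.length - j
decreasing_by omega

theorem pvFindJ_nonempty (lines : List String) (j m : Nat) (hm : pvFindJ lines j = m)
    (h : m < lines.length) : ¬ PySem.Str.strip lines[m] = "" := by
  rw [pvFindJ.eq_def] at hm
  by_cases hl : j < lines.length
  · simp only [hl, dite_true] at hm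
    by_cases he : PySem.Str.strip lines[j] = ""
    · simp only [he, if_true] at hm
      exact pvFindJ_nonempty lines (j + 1) m hm h
    · simp only [he, if_false] at hm
      subst hm; exact he
  · simp only [hl, dite_false] at hm
    subst hm; omega
termination_by lines.length - j
decreasing_by omega

theorem pvBStep_skip' (st : List (List (String × String)) × Option (String × String × String))
    (raw : String) (h : PySem.Str.strip raw = "") : pvBStep st raw = st := by
  simp [pvBStep, h]

theorem pv_foldl_skip (ls : List String) (h : ∀ x ∈ ls, PySem.Str.strip x = "")
    (st : List (List (String × String)) × Option (String × String × String)) :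
    ls.foldl pvBStep st = st := by
  induction ls generalizing st with
  | nil => rfl
  | cons x xs ih =>
    rw [List.foldl_cons, pvBStep_skip' st x (h x (List.mem_cons_self))]
    exact ih (fun y hy => h y (List.mem_cons_of_mem x hy)) st

theorem pvBStep_flush (acc : List (List (String × String))) (f : String × String × String)
    (raw : String) (h : ¬ PySem.Str.strip raw = "") :
    pvBStep (acc, some f) raw =
      pvBStep (acc ++ [[("name", f.1), ("url", PySem.Str.strip raw), ("logo", f.2.1),
        ("group", f.2.2)]], none) raw := by
  obtain ⟨n, l, g⟩ := f
  simp only [pvBStep]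
  rw [if_neg h, if_neg h]

set_option maxHeartbeats 1000000 in
theorem pv_main_aux (lines : List String) (n : Nat) : ∀ (i : Nat), lines.length - i ≤ n →
    ∀ (acc : List (List (String × String))),
    pvALoop lines i acc = ((lines.drop i).foldl pvBStep (acc, none)).1 := by
  induction n with
  | zero =>
    intro i hn acc
    rw [pvALoop.eq_def]
    have hi : ¬ i < lines.length := by omega
    simp only [hi, dite_false]
    rw [List.drop_eq_nil_of_le (by omega)]
    rfl
  | succ n ih =>
    intro i hn acc
    rw [pvALoop.eq_def]
    by_cases hi : i < lines.length
    · simp only [hi, dite_true]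
      have hdrop : lines.drop i = lines[i] :: lines.drop (i + 1) := List.drop_eq_getElem_cons hi
      by_cases hs : PySem.Str.startswith (PySem.Str.strip lines[i]) "#EXTINF:"
      · simp only [hs, if_true]
        have hj1 : i + 1 ≤ pvFindJ lines (i + 1) := pvFindJ_ge lines (i + 1)
        have hj2 : pvFindJ lines (i + 1) ≤ lines.length := pvFindJ_le lines (i + 1) (by omega)
        have hne : ¬ PySem.Str.strip lines[i] = "" := by
          intro h0; rw [h0] at hs; exact absurd hs (by decide)
        have hstep1 : pvBStep (acc, none) lines[i] =
            (acc, some (pvExtinfFields (PySem.Str.strip lines[i]))) := by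
          simp only [pvBStep]
          rw [if_neg hne, if_pos hs]
        set j := pvFindJ lines (i + 1) with hjdef
        rw [hdrop, List.foldl_cons, hstep1]
        have hsplit : lines.drop (i + 1) =
            (lines.drop (i + 1)).take (j - (i + 1)) ++ lines.drop j := by
          have h2 : i + 1 + (j - (i + 1)) = j := by omega
          conv_lhs => rw [← List.take_append_drop (j - (i + 1)) (lines.drop (i + 1))]
          rw [List.drop_drop, h2]
        have hseg : ∀ x ∈ (lines.drop (i + 1)).take (j - (i + 1)), PySem.Str.strip x = "" := by
          intro x hx
          obtain ⟨m, hm, hx'⟩ := List.getElem_of_mem hx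
          have hm' : m < j - (i + 1) := lt_of_lt_of_le hm (by simp [List.length_take])
          rw [List.getElem_take, List.getElem_drop] at hx'
          obtain ⟨_, he⟩ := pvFindJ_empty lines (i + 1) (i + 1 + m) (by omega) (by omega)
          rw [← hx']
          exact he
        rw [hsplit, List.foldl_append, pv_foldl_skip _ hseg _]
        by_cases hj : j < lines.length
        · simp only [hj, dite_true]
          have hjne : ¬ PySem.Str.strip lines[j] = "" :=
            pvFindJ_nonempty lines (i + 1) j hjdef.symm hj
          have hdropj : lines.drop j = lines[j] :: lines.drop (j + 1) :=
            List.drop_eq_getElem_cons hj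
          rw [hdropj, List.foldl_cons, pvBStep_flush _ _ _ hjne, ← List.foldl_cons, ← hdropj,
            ← ih j (by omega) _]
          simp only [pvExtinfFields]
        · simp only [hj, dite_false]
          rw [List.drop_eq_nil_of_le (by omega)]
          rfl
      · rw [if_neg hs]
        have hstep : pvBStep (acc, none) lines[i] = (acc, none) := by
          simp only [pvBStep]
          by_cases he : PySem.Str.strip lines[i] = ""
          · rw [if_pos he]
          · rw [if_neg he, if_neg hs]
        rw [ih (i + 1) (by omega) acc, hdrop, List.foldl_cons, hstep]
    · simp only [hi, dite_false]
      rw [List.drop_eq_nil_of_le (by omega)]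
      rfl

theorem pv_main (lines : List String) (i : Nat) (acc : List (List (String × String))) :
    pvALoop lines i acc = ((lines.drop i).foldl pvBStep (acc, none)).1 :=
  pv_main_aux lines (lines.length - i) i (Nat.le_refl _) acc

-- ===== VERDICT (by name: the statement is the Claim_ definition above) =====
theorem parse_m3u_to_json_spec : Claim_equal_parse_m3u_to_json := by
  intro m _ 
  unfold Spec_parse_m3u_to_json parse_m3u_to_json parse_m3u_to_json_alt
  simpa using pv_main (PySem.Str.splitlines m) 0 []
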